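-- pv_equiv track=rewrite | github.com/hnishi3/research-orchestrator | resorch/autopilot_digests.py | _parse_exploration_log
-- ===== SOURCE A (Python) =====
-- from typing import Any, Dict, List
--
-- def _parse_exploration_log(text: str) -> tuple:
--     """Parse existing exploration_log.md into (rejected_lines, recent_entries).
--
--     Returns:
--         rejected_lines: list of "- approach: reason (iter N)" strings
--         recent_entries: list of multi-line entry strings (one per iteration)
--     """
--     rejected_lines: List[str] = []
--     recent_entries: List[str] = []
--
--     if not text.strip():
--         return rejected_lines, recent_entries
--
--     in_rejected = False
--     in_recent = False
--     current_entry_lines: List[str] = []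
--
--     for line in text.splitlines():
--         stripped = line.strip()
--         if stripped.startswith("## Rejected directions"):
--             in_rejected = True
--             in_recent = False
--             continue
--         if stripped.startswith("## Recent alternatives"):
--             in_rejected = False
--             in_recent = True
--             continue
--         if stripped.startswith("# "):
--             in_rejected = False
--             in_recent = False
--             continue
--
--         if in_rejected:
--             if stripped.startswith("- ") and ":" in stripped:
--                 rejected_lines.append(stripped)
--         elif in_recent:
--             if stripped.startswith("### Iteration"):
--                 if current_entry_lines:
--                     recent_entries.append("\n".join(current_entry_lines))
--                 current_entry_lines = [stripped]
--             elif current_entry_lines: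
--                 current_entry_lines.append(line.rstrip())
--
--     if current_entry_lines:
--         recent_entries.append("\n".join(current_entry_lines))
--
--     return rejected_lines, recent_entries
-- ===== SOURCE B (Python) =====
-- def _parse_exploration_log(text: str) -> tuple:
--     """Two-phase rewrite: first partition the lines into the rejected and
--     recent blocks, then post-process each block separately."""
--     if not text.strip():
--         return [], []
--
--     # Phase 1: route each body line to the block of the active section.
--     rejected_block = []
--     recent_block = []
--     active = None
--     for line in text.splitlines():
--         stripped = line.strip()
--         if stripped.startswith("## Rejected directions"):
--             active = rejected_block
--         elif stripped.startswith("## Recent alternatives"):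
--             active = recent_block
--         elif stripped.startswith("# "):
--             active = None
--         elif active is not None:
--             active.append(line)
--
--     # Phase 2a: keep stripped bullet lines that carry a reason.
--     rejected_lines = [s for s in (l.strip() for l in rejected_block)
--                       if s.startswith("- ") and ":" in s]
--
--     # Phase 2b: split the recent block into per-iteration entries.
--     recent_entries = []
--     current = []
--     for line in recent_block:
--         stripped = line.strip()
--         if stripped.startswith("### Iteration"):
--             if current:
--                 recent_entries.append("\n".join(current))
--             current = [stripped]
--         elif current:
--             current.append(line.rstrip())
--     if current:
--         recent_entries.append("\n".join(current))
--
--     return rejected_lines, recent_entries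
-- ===== Notes on version B (the rewrite author's own statement) =====
-- stated objective: alternative
-- what changed: Replaces A's single interleaved flag loop (five pieces of state) with a two-phase pipeline: one routing pass partitions the lines into a rejected block and a recent block, then the rejected block is filtered by a comprehension and the recent block is split into iteration entries by a separate dedicated loop.
import Mathlib
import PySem

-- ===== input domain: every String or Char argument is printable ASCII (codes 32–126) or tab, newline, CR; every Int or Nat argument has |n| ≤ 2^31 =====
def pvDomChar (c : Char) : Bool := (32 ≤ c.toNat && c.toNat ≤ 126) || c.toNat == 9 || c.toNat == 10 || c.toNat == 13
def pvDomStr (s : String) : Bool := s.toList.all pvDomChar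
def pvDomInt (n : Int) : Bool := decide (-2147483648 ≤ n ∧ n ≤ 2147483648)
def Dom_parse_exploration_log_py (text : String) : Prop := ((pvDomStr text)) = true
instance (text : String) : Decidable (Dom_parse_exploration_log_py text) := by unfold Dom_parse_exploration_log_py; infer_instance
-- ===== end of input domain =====

-- B is an equal-cost alternative: a two-phase pipeline (partition lines into section blocks,
-- then post-process each block) instead of A's single five-state flag loop.

-- ===== PORT A =====
-- one loop step of A: state = (rejected_lines, recent_entries, current_entry_lines, in_rejected, in_recent)
def pelStepA (st : List String × List String × List String × Bool × Bool) (line : String) :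
    List String × List String × List String × Bool × Bool :=
  let (rej, rec, cur, inRej, inRec) := st
  let stripped := PySem.Str.strip line
  if PySem.Str.startswith stripped "## Rejected directions" then (rej, rec, cur, true, false)
  else if PySem.Str.startswith stripped "## Recent alternatives" then (rej, rec, cur, false, true)
  else if PySem.Str.startswith stripped "# " then (rej, rec, cur, false, false)
  else if inRej then
    (if PySem.Str.startswith stripped "- " && PySem.Str.isIn ":" stripped
       then rej ++ [stripped] else rej, rec, cur, inRej, inRec)
  else if inRec then
    if PySem.Str.startswith stripped "### Iteration" then
      (rej, (if cur ≠ [] then rec ++ [PySem.Str.join "\n" cur] else rec), [stripped], inRej, inRec)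
    else if cur ≠ [] then (rej, rec, cur ++ [PySem.Str.rstrip line], inRej, inRec)
    else (rej, rec, cur, inRej, inRec)
  else (rej, rec, cur, inRej, inRec)

def parse_exploration_log_py (text : String) : List String × List String :=
  if PySem.Str.strip text = "" then ([], [])
  else
    let st := (PySem.Str.splitlines text).foldl pelStepA ([], [], [], false, false)
    let (rej, rec, cur, _, _) := st
    (rej, if cur ≠ [] then rec ++ [PySem.Str.join "\n" cur] else rec)

-- ===== PORT B =====
-- which section block is active during phase 1
inductive PelMode : Type
  | off : PelMode
  | inRej : PelMode
  | inRec : PelMode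
deriving DecidableEq, Repr

-- phase 1: route each body line to its section's block
def pelStep1 (st : List String × List String × PelMode) (line : String) :
    List String × List String × PelMode :=
  let (rb, cb, m) := st
  let stripped := PySem.Str.strip line
  if PySem.Str.startswith stripped "## Rejected directions" then (rb, cb, PelMode.inRej)
  else if PySem.Str.startswith stripped "## Recent alternatives" then (rb, cb, PelMode.inRec)
  else if PySem.Str.startswith stripped "# " then (rb, cb, PelMode.off)
  else
    match m with
    | PelMode.inRej => (rb ++ [line], cb, m)
    | PelMode.inRec => (rb, cb ++ [line], m)
    | PelMode.off => (rb, cb, m)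

-- phase 2b: split the recent block into per-iteration entries
def pelStep2 (st : List String × List String) (line : String) : List String × List String :=
  let (ents, cur) := st
  let stripped := PySem.Str.strip line
  if PySem.Str.startswith stripped "### Iteration" then
    ((if cur ≠ [] then ents ++ [PySem.Str.join "\n" cur] else ents), [stripped])
  else if cur ≠ [] then (ents, cur ++ [PySem.Str.rstrip line])
  else (ents, cur)

def parse_exploration_log_py_alt (text : String) : List String × List String :=
  if PySem.Str.strip text = "" then ([], [])
  else
    let (rb, cb, _) := (PySem.Str.splitlines text).foldl pelStep1 ([], [], PelMode.off)
    let rejected := (rb.map PySem.Str.strip).filter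
      (fun s => PySem.Str.startswith s "- " && PySem.Str.isIn ":" s)
    let (ents, cur) := cb.foldl pelStep2 ([], [])
    (rejected, if cur ≠ [] then ents ++ [PySem.Str.join "\n" cur] else ents)

-- ===== PRECONDITION & SPEC =====
def Spec_parse_exploration_log_py (text : String) (out : List String × List String) : Prop := out = parse_exploration_log_py_alt text
instance (text : String) (out : List String × List String) : Decidable (Spec_parse_exploration_log_py text out) := by unfold Spec_parse_exploration_log_py; infer_instance

-- ===== CLAIM (what is proved, stated in full; the proofs are below) =====
def Claim_equal_parse_exploration_log_py : Prop := ∀ (text : String), Dom_parse_exploration_log_py text → Spec_parse_exploration_log_py text (parse_exploration_log_py text)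

-- ===== LEMMAS AND PROOFS =====

-- A's flag pair as a function of B's mode
def pelFlags : PelMode → Bool × Bool
  | PelMode.off => (false, false)
  | PelMode.inRej => (true, false)
  | PelMode.inRec => (false, true)

-- abstraction: A's full loop state computed from B's phase-1 state
def pelAbs (st : List String × List String × PelMode) :
    List String × List String × List String × Bool × Bool :=
  let (rb, cb, m) := st
  let (ents, cur) := cb.foldl pelStep2 ([], [])
  ((rb.map PySem.Str.strip).filter
      (fun s => PySem.Str.startswith s "- " && PySem.Str.isIn ":" s),
   ents, cur, (pelFlags m).1, (pelFlags m).2)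

theorem pelStep_comm (st : List String × List String × PelMode) (line : String) :
    pelStepA (pelAbs st) line = pelAbs (pelStep1 st line) := by
  obtain ⟨rb, cb, m⟩ := st
  simp only [pelStepA, pelAbs, pelStep1]
  split_ifs with h1 h2 h3 <;> cases m <;>
    simp_all [pelFlags, pelStep2, List.filter_append, List.map_append]

-- ===== VERDICT (by name: the statement is the Claim_ definition above) =====
theorem parse_exploration_log_py_spec : Claim_equal_parse_exploration_log_py := by
  intro text _
  unfold Spec_parse_exploration_log_py parse_exploration_log_py parse_exploration_log_py_alt
  by_cases h : PySem.Str.strip text = ""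
  · simp [h]
  · simp only [h, if_false]
    have key : (PySem.Str.splitlines text).foldl pelStepA ([], [], [], false, false)
        = pelAbs ((PySem.Str.splitlines text).foldl pelStep1 ([], [], PelMode.off)) := by
      have : pelAbs ([], [], PelMode.off) = ([], [], [], false, false) := by
        simp [pelAbs, pelFlags]
      rw [← this]
      exact List.foldl_hom pelAbs (fun st line => pelStep_comm st line)
    rw [key]
    obtain ⟨rb, cb, m⟩ := (PySem.Str.splitlines text).foldl pelStep1 ([], [], PelMode.off)
    simp [pelAbs]
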